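-- pv_equiv track=rewrite | github.com/minarth/advent-of-code | 2015/25/25.py | part_one
-- ===== SOURCE A (Python) =====
-- def part_one(starter, end_row, end_column):
--     grid = [[starter]]
--     row, col = 0, 0
--     while row != end_row or col != end_column:
--         prev_value = grid[row][col]
--         if row == 0:
--             row, col = len(grid), 0
--             grid.append([])
--         else:
--             row -= 1
--             col += 1
--
--         grid[row].append((prev_value * 252533) % 33554393)
--
--     return grid[end_row][end_column]
-- ===== SOURCE B (Python) =====
-- def part_one(starter, end_row, end_column):
--     # 0-based diagonal index of (end_row, end_column): cells are visited in
--     # diagonal order, (r, c) is the k-th cell with k = tri(r+c) + c.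
--     d = end_row + end_column
--     k = d * (d + 1) // 2 + end_column
--     if k == 0:
--         return starter  # the first cell holds the starter itself
--     return (starter * pow(252533, k, 33554393)) % 33554393
-- ===== Notes on version B (the rewrite author's own statement) =====
-- stated objective: faster
-- what changed: Replaces the cell-by-cell simulation that materialises the whole triangular grid with a closed-form diagonal index k = tri(r+c)+c plus modular exponentiation pow(252533, k, 33554393).
import Mathlib
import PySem

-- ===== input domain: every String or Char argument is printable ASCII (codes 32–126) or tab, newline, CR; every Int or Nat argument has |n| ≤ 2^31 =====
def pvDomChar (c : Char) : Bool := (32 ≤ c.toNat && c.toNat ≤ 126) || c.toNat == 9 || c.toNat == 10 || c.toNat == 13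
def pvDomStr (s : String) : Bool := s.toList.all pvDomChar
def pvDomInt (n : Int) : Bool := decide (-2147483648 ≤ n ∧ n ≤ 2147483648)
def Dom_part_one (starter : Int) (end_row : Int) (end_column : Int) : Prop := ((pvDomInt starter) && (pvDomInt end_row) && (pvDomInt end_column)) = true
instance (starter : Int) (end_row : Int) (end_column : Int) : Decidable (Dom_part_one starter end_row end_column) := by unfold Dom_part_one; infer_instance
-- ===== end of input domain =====

-- B replaces A's cell-by-cell grid simulation by the closed-form diagonal index
-- k = tri(r+c)+c and modular exponentiation (objective: faster, asymptotically).

-- ===== PORT A =====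
-- grid[row][col] read; the loop's indices are always nonnegative and in range,
-- so the toNat/getD-guarded forms are exact there (Python raises only on
-- out-of-range, which the loop never produces; the final read happens at the
-- current cell).
def pvRead (g : List (List Int)) (r c : Int) : Int :=
  (g.getD r.toNat []).getD c.toNat 0

-- grid[r].append(v): in-place append to row r
def pvAppendAt (g : List (List Int)) (r : Int) (v : Int) : List (List Int) :=
  g.set r.toNat ((g.getD r.toNat []) ++ [v])

-- the while loop; fuel = number of remaining iterations (exact under Pre_,
-- a pure totality device: A's loop diverges for negative targets)
def part_one_go (er ec : Int) : Nat → List (List Int) → Int → Int → Int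
  | fuel, grid, row, col =>
    if row = er ∧ col = ec then pvRead grid er ec
    else
      match fuel with
      | 0 => pvRead grid er ec
      | Nat.succ f =>
        let prev := pvRead grid row col
        let next := PySem.Int.mod (prev * 252533) 33554393
        if row = 0 then
          part_one_go er ec f (pvAppendAt (grid ++ [[]]) (grid.length : Int) next)
            (grid.length : Int) 0
        else
          part_one_go er ec f (pvAppendAt grid (row - 1) next) (row - 1) (col + 1)

def part_one (starter : Int) (end_row : Int) (end_column : Int) : Int :=
  part_one_go end_row end_column
    (((end_row + end_column) * (end_row + end_column + 1) / 2 + end_column).toNat)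
    [[starter]] 0 0

-- ===== PORT B =====
def part_one_alt (starter : Int) (end_row : Int) (end_column : Int) : Int :=
  let d := end_row + end_column
  let k := PySem.Int.floordiv (d * (d + 1)) 2 + end_column
  if k = 0 then starter
  else PySem.Int.mod (starter * PySem.Int.powMod 252533 k.toNat 33554393) 33554393

-- ===== PRECONDITION & SPEC =====
-- A's while loop only ever visits nonnegative positions, so it never
-- terminates (Python loops forever, growing the grid) when end_row or
-- end_column is negative; Pre_ excludes exactly those inputs.
def Pre_part_one (starter : Int) (end_row : Int) (end_column : Int) : Prop :=
  0 ≤ end_row ∧ 0 ≤ end_column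
instance (starter : Int) (end_row : Int) (end_column : Int) : Decidable (Pre_part_one starter end_row end_column) := by unfold Pre_part_one; infer_instance

def pvWitness_part_one : Int × Int × Int := (20151125, 2, 3)

def Spec_part_one (starter : Int) (end_row : Int) (end_column : Int) (out : Int) : Prop := out = part_one_alt starter end_row end_column
instance (starter : Int) (end_row : Int) (end_column : Int) (out : Int) : Decidable (Spec_part_one starter end_row end_column out) := by unfold Spec_part_one; infer_instance

-- ===== CLAIM (what is proved, stated in full; the proofs are below) =====
def Claim_equal_part_one : Prop := ∀ (starter : Int) (end_row : Int) (end_column : Int), Dom_part_one starter end_row end_column → Pre_part_one starter end_row end_column → Spec_part_one starter end_row end_column (part_one starter end_row end_column)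

-- ===== LEMMAS AND PROOFS =====

-- one multiplication step of the walk
def pvStep (v : Int) : Int := PySem.Int.mod (v * 252533) 33554393

-- iterate pvStep n times
def pvIter : Nat → Int → Int
  | 0, v => v
  | n+1, v => pvIter n (pvStep v)

-- 0-based diagonal index of position (r, c)
def pvIdxN (r c : Nat) : Nat := (r + c) * (r + c + 1) / 2 + c

-- loop invariant: grid is the filled triangular walk up to current cell (row, col)
def pvInv (g : List (List Int)) (row col : Nat) (v : Int) : Prop :=
  g.length = row + col + 1 ∧
  (∀ r : Nat, r < row → (g[r]?.getD []).length = row + col - r) ∧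
  (∀ r : Nat, row ≤ r → r ≤ row + col → (g[r]?.getD []).length = row + col - r + 1) ∧
  ((g[row]?.getD [])[col]?.getD 0 = v)

lemma pvIdx_inj (r c r' c' : Int) (hr : 0 ≤ r) (hc : 0 ≤ c) (hr' : 0 ≤ r') (hc' : 0 ≤ c')
    (h : (r+c)*(r+c+1)/2 + c = (r'+c')*(r'+c'+1)/2 + c') : r = r' ∧ c = c' := by
  have h2 : (r+c)*((r+c)+1) % 2 = 0 := Int.even_iff.mp (Int.even_mul_succ_self _)
  have h3 : (r'+c')*((r'+c')+1) % 2 = 0 := Int.even_iff.mp (Int.even_mul_succ_self _)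
  rcases lt_trichotomy (r+c) (r'+c') with hlt | heq | hgt
  · have hpq : (r+c)*((r+c)+1) + 2*(r+c) + 2 ≤ (r'+c')*((r'+c')+1) := by nlinarith
    generalize hP : (r+c)*((r+c)+1) = P at *
    generalize hQ : (r'+c')*((r'+c')+1) = Q at *
    omega
  · have hPQ : (r+c)*((r+c)+1) = (r'+c')*((r'+c')+1) := by rw [heq]
    generalize hP : (r+c)*((r+c)+1) = P at *
    generalize hQ : (r'+c')*((r'+c')+1) = Q at *
    omega
  · have hpq : (r'+c')*((r'+c')+1) + 2*(r'+c') + 2 ≤ (r+c)*((r+c)+1) := by nlinarith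
    generalize hP : (r+c)*((r+c)+1) = P at *
    generalize hQ : (r'+c')*((r'+c')+1) = Q at *
    omega

-- cast of the Nat index to the Int index expression
lemma pvIdxN_cast (r c : Nat) :
    ((pvIdxN r c : Nat) : Int) = ((r:Int)+(c:Int))*((r:Int)+(c:Int)+1)/2 + (c:Int) := by
  unfold pvIdxN
  have h : (((r+c)*(r+c+1) : Nat) : Int) = ((r:Int)+c)*((r:Int)+c+1) := by push_cast; ring
  have h2 : ((((r+c)*(r+c+1))/2 : Nat) : Int) = (((r+c)*(r+c+1) : Nat) : Int) / 2 := by omega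
  rw [Nat.cast_add, h2, h]

lemma pvIdxN_succ_diag (c : Nat) : pvIdxN (c+1) 0 = pvIdxN 0 c + 1 := by
  unfold pvIdxN
  have h1 : (c+1+0)*(c+1+0+1) = (0+c)*(0+c+1) + 2*(c+1) := by ring
  have h2 : (0+c)*(0+c+1) % 2 = 0 := Nat.even_iff.mp (Nat.even_mul_succ_self _)
  generalize hP : (0+c)*(0+c+1) = P at *
  generalize hQ : (c+1+0)*(c+1+0+1) = Q at *
  omega

lemma pvIdxN_succ_step (k c : Nat) : pvIdxN k (c+1) = pvIdxN (k+1) c + 1 := by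
  unfold pvIdxN
  have h : k + (c+1) = (k+1) + c := by omega
  rw [h]
  omega

lemma go_spec (er ec : Int) (her : 0 ≤ er) (hec : 0 ≤ ec) :
    ∀ (fuel : Nat) (grid : List (List Int)) (row col : Nat) (v : Int),
      pvInv grid row col v →
      ((pvIdxN row col : Nat) : Int) + (fuel : Int) = (er+ec)*(er+ec+1)/2 + ec →
      part_one_go er ec fuel grid (row : Int) (col : Int) = pvIter fuel v := by
  intro fuel
  induction fuel with
  | zero =>
    intro grid row col v hInv hIdx
    have h0 : ((pvIdxN row col : Nat) : Int) = (er+ec)*(er+ec+1)/2 + ec := by simpa using hIdx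
    rw [pvIdxN_cast] at h0
    obtain ⟨h1, h2⟩ := pvIdx_inj _ _ _ _ (Int.natCast_nonneg row) (Int.natCast_nonneg col) her hec h0
    rw [part_one_go, if_pos ⟨h1, h2⟩]
    rw [← h1, ← h2]
    simp only [pvRead, Int.toNat_natCast, List.getD_eq_getElem?_getD]
    exact hInv.2.2.2
  | succ f ih =>
    intro grid row col v hInv hIdx
    obtain ⟨hlen, hbelow, habove, hread⟩ := hInv
    have hne : ¬ ((row:Int) = er ∧ (col:Int) = ec) := by
      rintro ⟨h1, h2⟩
      rw [← h1, ← h2, ← pvIdxN_cast] at hIdx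
      omega
    rw [part_one_go, if_neg hne]
    have hreadv : pvRead grid (row:Int) (col:Int) = v := by
      simp only [pvRead, Int.toNat_natCast, List.getD_eq_getElem?_getD]; exact hread
    rw [hreadv]
    by_cases hrow : row = 0
    · subst hrow
      rw [if_pos (by norm_num : ((0:Nat):Int) = 0)]
      have hlg : grid.length = col + 1 := by omega
      set next := PySem.Int.mod (v * 252533) 33554393 with hnext
      have hset : pvAppendAt (grid ++ [[]]) (grid.length : Int) next = grid ++ [[next]] := by
        unfold pvAppendAt
        rw [Int.toNat_natCast]
        have hg : (grid ++ [([] : List Int)]).getD grid.length [] = [] := by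
          simp [List.getD_eq_getElem?_getD]
        rw [hg]
        simp
      rw [hset]
      have hcast : ((grid.length : Nat) : Int) = (((col+1 : Nat)) : Int) := by rw [hlg]
      rw [hcast]
      have hlast : (grid ++ [[next]])[col+1]? = some [next] := by
        rw [← hlg]
        simp
      have := ih (grid ++ [[next]]) (col+1) 0 next ?_ ?_
      · rw [Nat.cast_zero] at this
        rw [this]
        rfl
      · refine ⟨by simp [hlg], ?_, ?_, ?_⟩
        · intro r hr
          have hrlt : r < grid.length := by omega
          rw [List.getElem?_append_left hrlt]
          have := habove r (by omega) (by omega)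
          omega
        · intro r hr1 hr2
          have hre : r = col + 1 := by omega
          subst hre
          rw [hlast]
          simp
        · rw [hlast]
          simp
      · rw [pvIdxN_succ_diag]
        push_cast
        push_cast at hIdx
        omega
    · obtain ⟨k, rfl⟩ : ∃ k, row = k + 1 := ⟨row - 1, by omega⟩
      rw [if_neg (by push_cast; omega : ¬ (((k+1:Nat)):Int) = 0)]
      have e1 : (((k+1:Nat)):Int) - 1 = ((k:Nat):Int) := by push_cast; ring
      have e2 : ((col:Nat):Int) + 1 = (((col+1:Nat)):Int) := by push_cast; ring
      rw [e1, e2]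
      set next := PySem.Int.mod (v * 252533) 33554393 with hnext
      have hklen : (grid[k]?.getD []).length = col + 1 := by
        have := hbelow k (by omega); omega
      have hset : pvAppendAt grid ((k:Nat):Int) next
          = grid.set k ((grid[k]?.getD []) ++ [next]) := by
        unfold pvAppendAt
        rw [Int.toNat_natCast, List.getD_eq_getElem?_getD]
      rw [hset]
      have hkset : (grid.set k ((grid[k]?.getD []) ++ [next]))[k]? = some ((grid[k]?.getD []) ++ [next]) := by
        rw [List.getElem?_set]
        simp [show k < grid.length by omega]
      have := ih (grid.set k ((grid[k]?.getD []) ++ [next])) k (col+1) next ?_ ?_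
      · rw [this]
        rfl
      · refine ⟨by simp; omega, ?_, ?_, ?_⟩
        · intro r hr
          rw [List.getElem?_set, if_neg (by omega : ¬ k = r)]
          have := hbelow r (by omega)
          omega
        · intro r hr1 hr2
          by_cases hrk : r = k
          · subst hrk
            rw [hkset]
            simp
            omega
          · rw [List.getElem?_set, if_neg (by omega : ¬ k = r)]
            have := habove r (by omega) (by omega)
            omega
        · rw [hkset]
          simp only [Option.getD_some]
          rw [show col + 1 = (grid[k]?.getD []).length from hklen.symm]
          simp
      · rw [pvIdxN_succ_step]
        push_cast
        push_cast at hIdx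
        omega

lemma pvIter_eq (n : Nat) (v : Int) :
    pvIter n v = if n = 0 then v else PySem.Int.mod (v * 252533 ^ n) 33554393 := by
  induction n generalizing v with
  | zero => rfl
  | succ m ih =>
    rw [show pvIter (m+1) v = pvIter m (pvStep v) from rfl, ih]
    by_cases hm : m = 0
    · subst hm
      simp [pvStep, pow_one]
    · rw [if_neg hm, if_neg (Nat.succ_ne_zero m)]
      have hM : (0:Int) < 33554393 := by norm_num
      simp only [pvStep, PySem.Int.mod_eq_emod_of_pos hM]
      rw [pow_succ]
      conv_rhs => rw [show v * (252533 ^ m * 252533) = (v * 252533) * 252533 ^ m by ring]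
      rw [Int.mul_emod ((v*252533) % 33554393) (252533^m),
        Int.emod_emod_of_dvd _ dvd_rfl, ← Int.mul_emod]

-- ===== VERDICT (by name: the statement is the Claim_ definition above) =====
theorem part_one_spec : Claim_equal_part_one := by
  unfold Claim_equal_part_one Spec_part_one Pre_part_one
  intro s er ec _ hpre
  obtain ⟨her, hec⟩ := hpre
  have htri : 0 ≤ (er+ec)*(er+ec+1)/2 := Int.ediv_nonneg (by nlinarith) (by norm_num)
  have hKnn : 0 ≤ (er+ec)*(er+ec+1)/2 + ec := by omega
  have hInv0 : pvInv [[s]] 0 0 s := by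
    refine ⟨rfl, fun r hr => absurd hr (by omega), fun r h1 h2 => ?_, rfl⟩
    have hr0 : r = 0 := by omega
    subst hr0
    rfl
  have hgo := go_spec er ec her hec ((er+ec)*(er+ec+1)/2 + ec).toNat [[s]] 0 0 s hInv0 ?_
  · unfold part_one part_one_alt
    rw [show ((0:Nat):Int) = (0:Int) from rfl] at hgo
    rw [hgo, pvIter_eq]
    have hfd : PySem.Int.floordiv ((er+ec) * ((er+ec) + 1)) 2 = (er+ec)*(er+ec+1)/2 :=
      PySem.Int.floordiv_eq_ediv_of_pos (by norm_num)
    simp only [hfd]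
    have hiff : ((er+ec)*(er+ec+1)/2 + ec).toNat = 0 ↔ (er+ec)*(er+ec+1)/2 + ec = 0 := by omega
    by_cases hz : (er+ec)*(er+ec+1)/2 + ec = 0
    · rw [if_pos (hiff.mpr hz), if_pos hz]
    · rw [if_neg (fun h => hz (hiff.mp h)), if_neg hz]
      unfold PySem.Int.powMod
      have hM : (0:Int) < 33554393 := by norm_num
      simp only [PySem.Int.mod_eq_emod_of_pos hM]
      rw [Int.mul_emod s (252533 ^ ((er+ec)*(er+ec+1)/2 + ec).toNat % 33554393),
        Int.emod_emod_of_dvd _ dvd_rfl, ← Int.mul_emod]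
  · have h00 : pvIdxN 0 0 = 0 := rfl
    rw [h00, Int.toNat_of_nonneg hKnn]
    simp
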